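-- pv_equiv track=rewrite | github.com/hsaliak/advent | day4.py | repeat_criteria
-- ===== SOURCE A (Python) =====
-- from typing import List, Iterator
--
-- def repeat_criteria(ds : List[int]) -> bool:
--     vals = ds[:]
--     prev = -2
--     repeats = False
--     adjacents = True
--     while len(vals) >  0:
--         tmp = vals.pop() # last item.
--         if tmp == prev:
--             if repeats == False:
--                 repeats = True # continue scanning
--             else: #repeats == True, toggle it and move on
--                 repeats = False # dont count
--                 adjacents = True
--         else: #tmp != prev
--             if repeats == True: # 123444 case, we are at
--                 if adjacents == True:
--                     repeats = False
--                     adjacents = False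
--                 else:
--                     return True
--             if prev != -1:
--                 adjacents = False
--             prev = tmp
--     return repeats and not adjacents
-- ===== SOURCE B (Python) =====
-- from typing import List
--
-- def repeat_criteria(ds: List[int]) -> bool:
--     # Group the digits into maximal runs of consecutive equal values,
--     # then succeed iff some run has length exactly 2.
--     runs = []
--     for d in ds:
--         if runs and runs[-1][0] == d:
--             runs[-1][1] += 1
--         else:
--             runs.append([d, 1])
--     return any(n == 2 for _, n in runs)
-- ===== Notes on version B (the rewrite author's own statement) =====
-- stated objective: simpler
-- what changed: A's right-to-left boolean toggle state machine (with -2/-1 sentinel values for prev) is replaced by a left-to-right grouping of the list into maximal runs of equal values followed by a simple check that some run has length exactly 2.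
-- outside the precondition, e.g. on repeat_criteria([-2, -2]): A returns False, B returns True; on repeat_criteria([0, 0, -1, -1, -1]): A returns False, B returns True
import Mathlib
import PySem

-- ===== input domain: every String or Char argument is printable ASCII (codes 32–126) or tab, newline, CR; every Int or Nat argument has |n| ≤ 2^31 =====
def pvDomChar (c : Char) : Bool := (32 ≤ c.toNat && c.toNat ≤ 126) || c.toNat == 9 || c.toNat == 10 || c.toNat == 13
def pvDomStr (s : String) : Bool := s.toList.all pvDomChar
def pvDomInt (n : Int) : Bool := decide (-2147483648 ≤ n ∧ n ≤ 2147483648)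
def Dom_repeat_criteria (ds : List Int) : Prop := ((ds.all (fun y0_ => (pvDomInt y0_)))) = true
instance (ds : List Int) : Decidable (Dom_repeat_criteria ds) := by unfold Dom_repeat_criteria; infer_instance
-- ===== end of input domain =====

-- B replaces A's right-to-left boolean-toggle state machine by grouping the list into
-- maximal runs of consecutive equal values and checking whether some run has length exactly 2.

-- ===== PORT A =====
-- A copies ds and pops from the END of the copy, so the while loop consumes ds
-- right-to-left: we recurse over ds.reverse carrying the same state (prev, repeats, adjacents).
def pvLoopA : List Int → Int → Bool → Bool → Bool
  | [], _, repeats, adjacents => repeats && !adjacents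
  | tmp :: vals, prev, repeats, adjacents =>
    if tmp = prev then
      if repeats = false then
        pvLoopA vals prev true adjacents
      else
        pvLoopA vals prev false true
    else
      if repeats = true then
        if adjacents = true then
          pvLoopA vals tmp false (if prev ≠ -1 then false else false)
        else
          true
      else
        pvLoopA vals tmp repeats (if prev ≠ -1 then false else adjacents)

def repeat_criteria (ds : List Int) : Bool :=
  pvLoopA ds.reverse (-2) false true

-- ===== PORT B =====
-- one step of B's for-loop: extend the last run (runs[-1][1] += 1) or append a new run [d, 1]
def pvBStep (runs : List (Int × Int)) (d : Int) : List (Int × Int) :=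
  match runs.getLast? with
  | some (x, n) => if x = d then runs.dropLast ++ [(x, n + 1)] else runs ++ [(d, 1)]
  | none => [(d, 1)]

def repeat_criteria_alt (ds : List Int) : Bool :=
  (ds.foldl pvBStep []).any (fun p => p.2 == 2)

-- ===== PRECONDITION & SPEC =====
-- Pre_ excludes lists containing -1 or -2: those values collide with A's internal sentinels
-- (prev is initialised to -2, and -1 guards the 'adjacents' update), so A returns accidental
-- values on them (e.g. A([-2, -2]) = False); the function's natural inputs are digit lists.
def Pre_repeat_criteria (ds : List Int) : Prop := (-1 : Int) ∉ ds ∧ (-2 : Int) ∉ ds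
instance (ds : List Int) : Decidable (Pre_repeat_criteria ds) := by unfold Pre_repeat_criteria; infer_instance

def pvWitness_repeat_criteria : List Int := [1, 2, 2, 3]

def Spec_repeat_criteria (ds : List Int) (out : Bool) : Prop := out = repeat_criteria_alt ds
instance (ds : List Int) (out : Bool) : Decidable (Spec_repeat_criteria ds out) := by unfold Spec_repeat_criteria; infer_instance

-- ===== CLAIM (what is proved, stated in full; the proofs are below) =====
def Claim_equal_repeat_criteria : Prop := ∀ (ds : List Int), Dom_repeat_criteria ds → Pre_repeat_criteria ds → Spec_repeat_criteria ds (repeat_criteria ds)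

-- ===== LEMMAS AND PROOFS =====

-- run-length encoding of a list (counts as Int, as the Python keeps them)
def pvRL : List Int → List (Int × Int)
  | [] => []
  | x :: t =>
    (x, 1 + ((t.takeWhile (· == x)).length : Int)) :: pvRL (t.dropWhile (· == x))
termination_by l => l.length
decreasing_by
  simp only [List.length_cons]
  exact Nat.lt_succ_of_le (List.length_dropWhile_le _ _)


@[simp] theorem pvRL_nil : pvRL [] = [] := by rw [pvRL.eq_def]
@[simp] theorem pvRL_cons (x : Int) (t : List Int) :
    pvRL (x :: t) = (x, 1 + ((t.takeWhile (· == x)).length : Int)) :: pvRL (t.dropWhile (· == x)) := by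
  conv_lhs => rw [pvRL.eq_def]

def pvHasRun2 (l : List Int) : Bool := (pvRL l).any (fun p => p.2 == 2)

theorem pv_hasRun2_cons (x : Int) (t : List Int) :
    pvHasRun2 (x :: t)
      = (decide (1 + (t.takeWhile (· == x)).length = 2) || pvHasRun2 (t.dropWhile (· == x))) := by
  simp only [pvHasRun2, pvRL_cons, List.any_cons]
  congr 1
  rw [Bool.eq_iff_iff]
  simp only [beq_iff_eq, decide_eq_true_eq]
  omega

theorem pv_hasRun2_replicate (k : Nat) (x : Int) :
    pvHasRun2 (List.replicate k x) = decide (k = 2) := by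
  cases k with
  | zero => simp [pvHasRun2]
  | succ k' =>
    have htw : (List.replicate k' x).takeWhile (· == x) = List.replicate k' x := by
      rw [List.takeWhile_eq_self_iff]
      intro a ha; simp [List.eq_of_mem_replicate ha]
    have hdw : (List.replicate k' x).dropWhile (· == x) = [] := by
      rw [List.dropWhile_eq_nil_iff]
      intro a ha; simp [List.eq_of_mem_replicate ha]
    rw [List.replicate_succ, pv_hasRun2_cons, htw, hdw]
    simp [pvHasRun2]
    omega

-- B's foldl builds exactly the run-length encoding (general accumulator form)
theorem pv_foldl_runs (ds : List Int) (rs : List (Int × Int)) (x : Int) (n : Int) :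
    List.foldl pvBStep (rs ++ [(x, n)]) ds
      = rs ++ [(x, n + ((ds.takeWhile (· == x)).length : Int))] ++ pvRL (ds.dropWhile (· == x)) := by
  induction ds generalizing rs x n with
  | nil => simp
  | cons d t ih =>
    by_cases h : d = x
    · subst h
      have hstep : pvBStep (rs ++ [(d, n)]) d = rs ++ [(d, n + 1)] := by
        simp [pvBStep]
      rw [List.foldl_cons, hstep, ih rs d (n + 1)]
      simp only [List.takeWhile_cons, List.dropWhile_cons, BEq.rfl, if_true]
      simp; ring_nf
    · have hstep : pvBStep (rs ++ [(x, n)]) d = (rs ++ [(x, n)]) ++ [(d, 1)] := by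
        simp [pvBStep, Ne.symm h]
      have hd : (d == x) = false := by simp [h]
      rw [List.foldl_cons, hstep, ih (rs ++ [(x, n)]) d 1]
      simp only [List.takeWhile_cons, List.dropWhile_cons, hd]
      simp

theorem pv_alt_eq_hasRun2 (ds : List Int) : repeat_criteria_alt ds = pvHasRun2 ds := by
  cases ds with
  | nil => simp [repeat_criteria_alt, pvHasRun2]
  | cons d t =>
    have h0 : pvBStep [] d = [] ++ [(d, (1 : Int))] := by simp [pvBStep]
    rw [repeat_criteria_alt, List.foldl_cons, h0, pv_foldl_runs t [] d 1]
    rw [pvHasRun2, pvRL_cons]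
    simp only [List.nil_append, List.cons_append, List.any_cons]

-- takeWhile (· == x) produces a replicate of x
theorem pv_tw_replicate (t : List Int) (x : Int) :
    t.takeWhile (· == x) = List.replicate (t.takeWhile (· == x)).length x := by
  rw [List.eq_replicate_iff]
  refine ⟨rfl, fun a ha => ?_⟩
  have := List.mem_takeWhile_imp (α := Int) (p := (· == x)) (l := t) ha
  simpa using this

-- appending a uniform run, separated from zs, to the right
theorem pv_hasRun2_append_run : ∀ (n : Nat) (zs : List Int) (x : Int) (k : Nat),
    zs.length = n → 1 ≤ k → zs.getLast? ≠ some x →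
    pvHasRun2 (zs ++ List.replicate k x) = (pvHasRun2 zs || decide (k = 2)) := by
  intro n
  induction n using Nat.strong_induction_on with
  | _ n ih =>
  intro zs x k hn hk hlast
  cases zs with
  | nil => rw [List.nil_append, pv_hasRun2_replicate]; simp [pvHasRun2]
  | cons y t =>
    rw [List.cons_append, pv_hasRun2_cons, pv_hasRun2_cons]
    by_cases hall : t.dropWhile (· == y) = []
    · -- the whole of y :: t is one run of y, and y ≠ x
      have htall : t.takeWhile (· == y) = t := by
        have h := List.takeWhile_append_dropWhile (p := (· == y)) (l := t)
        rw [hall, List.append_nil] at h; exact h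
      have hxy : (x == y) = false := by
        have hally : ∀ a ∈ y :: t, a = y := by
          intro a ha
          rcases List.mem_cons.mp ha with h | h
          · exact h
          · have := List.mem_takeWhile_imp (α := Int) (p := (· == y)) (l := t) (htall ▸ h)
            simpa using this
        have hsome : (y :: t).getLast? = some y := by
          rw [List.getLast?_eq_some_getLast (by simp)]
          exact congrArg some (hally _ (List.getLast_mem _))
        simp only [beq_eq_false_iff_ne, ne_eq]
        intro he; subst he
        exact hlast hsome
      have htw : (t ++ List.replicate k x).takeWhile (· == y) = t := by
        rw [List.takeWhile_append, htall, if_pos rfl, List.takeWhile_replicate, if_neg (by simp [hxy]), List.append_nil]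
      have hdw : (t ++ List.replicate k x).dropWhile (· == y) = List.replicate k x := by
        rw [List.dropWhile_append, hall]
        simp [hxy]
      rw [htw, hdw, htall, hall, pv_hasRun2_replicate]
      simp [pvHasRun2]
    · -- the first run of zs ends inside zs; recurse on the rest
      have hlen : (t.takeWhile (· == y)).length ≠ t.length := by
        intro he
        have hsum := congrArg List.length (List.takeWhile_append_dropWhile (p := (· == y)) (l := t))
        rw [List.length_append] at hsum
        have : (t.dropWhile (· == y)).length = 0 := by omega
        exact hall (List.eq_nil_of_length_eq_zero this)
      have htw : (t ++ List.replicate k x).takeWhile (· == y) = t.takeWhile (· == y) := by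
        rw [List.takeWhile_append, if_neg hlen]
      have hdw : (t ++ List.replicate k x).dropWhile (· == y)
          = t.dropWhile (· == y) ++ List.replicate k x := by
        rw [List.dropWhile_append, if_neg (by simpa [List.isEmpty_iff] using hall)]
      have hlast' : (t.dropWhile (· == y)).getLast? ≠ some x := by
        have hsuff : (t.dropWhile (· == y)).IsSuffix (y :: t) :=
          (List.dropWhile_suffix _).trans (List.suffix_cons _ _)
        rw [List.getLast?_eq_some_getLast hall]
        rw [List.IsSuffix.getLast hsuff hall]
        rw [← List.getLast?_eq_some_getLast]
        exact hlast
      have hrec := ih (t.dropWhile (· == y)).length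
        (by rw [← hn]; exact Nat.lt_succ_of_le (List.length_dropWhile_le _ _))
        (t.dropWhile (· == y)) x k rfl hk hlast'
      rw [htw, hdw, hrec, Bool.or_assoc]

-- the run structure (and hence pvHasRun2) is symmetric under reversal
theorem pv_hasRun2_reverse : ∀ (n : Nat) (l : List Int), l.length = n →
    pvHasRun2 l.reverse = pvHasRun2 l := by
  intro n
  induction n using Nat.strong_induction_on with
  | _ n ih =>
  intro l hn
  cases l with
  | nil => rfl
  | cons x t =>
    -- x :: t = replicate (1 + |tw|) x ++ dw, so reverse = reverse dw ++ replicate (1 + |tw|) x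
    have hdec : x :: t = List.replicate (1 + (t.takeWhile (· == x)).length) x
        ++ t.dropWhile (· == x) := by
      rw [Nat.add_comm, List.replicate_succ, List.cons_append]
      congr 1
      rw [← pv_tw_replicate t x]
      exact (List.takeWhile_append_dropWhile (p := (· == x)) (l := t)).symm
    have hrev : (x :: t).reverse = (t.dropWhile (· == x)).reverse
        ++ List.replicate (1 + (t.takeWhile (· == x)).length) x := by
      nth_rewrite 1 [hdec]
      rw [List.reverse_append, List.reverse_replicate]
    have hlast : ((t.dropWhile (· == x)).reverse).getLast? ≠ some x := by
      rw [List.getLast?_reverse]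
      cases hd : t.dropWhile (· == x) with
      | nil => simp
      | cons z zs =>
        have hz := List.head_dropWhile_not (· == x) (l := t) (by simp [hd])
        have hzz : (t.dropWhile (· == x)).head (by simp [hd]) = z := by
          simp [hd]
        rw [hzz] at hz
        simpa using hz
    have hlt : (t.dropWhile (· == x)).length < n := by
      rw [← hn]; exact Nat.lt_succ_of_le (List.length_dropWhile_le _ _)
    rw [hrev, pv_hasRun2_append_run ((t.dropWhile (· == x)).reverse).length _ _ _
      (by simp) (by omega) hlast]
    rw [ih (t.dropWhile (· == x)).length hlt (t.dropWhile (· == x)) rfl]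
    rw [pv_hasRun2_cons, Bool.or_comm]

-- A's loop, characterised: scanning a run of prev already m elements deep, the state is
-- (repeats, adjacents) = (m even, 3 ≤ m), and the loop returns "the current run has total
-- length exactly 2, or some later maximal run has length exactly 2".
theorem pv_loopA_char (xs : List Int) : ∀ (prev : Int) (m : Nat),
    1 ≤ m → (-1 : Int) ∉ xs → prev ≠ -1 →
    pvLoopA xs prev (decide (m % 2 = 0)) (decide (3 ≤ m))
      = (decide (m + (xs.takeWhile (· == prev)).length = 2)
          || pvHasRun2 (xs.dropWhile (· == prev))) := by
  induction xs with
  | nil =>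
    intro prev m hm _ _
    simp only [pvLoopA, List.takeWhile_nil, List.dropWhile_nil]
    simp only [List.length_nil, Nat.add_zero, pvHasRun2, pvRL_nil, List.any_nil, Bool.or_false]
    rw [Bool.eq_iff_iff]
    simp only [Bool.and_eq_true, Bool.not_eq_eq_eq_not, Bool.not_true, decide_eq_true_eq,
      decide_eq_false_iff_not, not_le]
    omega
  | cons y ys ih =>
    intro prev m hm hx hp
    have hy1 : y ≠ -1 := by intro h; exact hx (h ▸ List.mem_cons_self)
    have hx' : (-1 : Int) ∉ ys := fun h => hx (List.mem_cons_of_mem _ h)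
    by_cases h : y = prev
    · subst h
      rw [List.takeWhile_cons_of_pos (by simp), List.dropWhile_cons_of_pos (by simp)]
      have hrec := ih y (m + 1) (by omega) hx' hy1
      rcases Nat.even_or_odd m with he | ho
      · -- repeats = true at this element: toggle off, adjacents := true
        have he' : m % 2 = 0 := Nat.even_iff.mp he
        have e1 : decide (m % 2 = 0) = true := by simp [he']
        have e2 : decide ((m + 1) % 2 = 0) = false := by simp; omega
        have e3 : decide (3 ≤ m + 1) = true := by simp; omega
        rw [e2, e3] at hrec
        rw [e1]
        have step : pvLoopA (y :: ys) y true (decide (3 ≤ m)) = pvLoopA ys y false true := by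
          simp [pvLoopA]
        rw [step, hrec]
        congr 1
        rw [decide_eq_decide]
        simp only [List.length_cons]
        omega
      · -- repeats = false: set repeats, keep adjacents
        have ho' : m % 2 = 1 := Nat.odd_iff.mp ho
        have e1 : decide (m % 2 = 0) = false := by simp [ho']
        have e2 : decide ((m + 1) % 2 = 0) = true := by simp; omega
        have e3 : decide (3 ≤ m + 1) = decide (3 ≤ m) := by
          rw [decide_eq_decide]; omega
        rw [e2, e3] at hrec
        rw [e1]
        have step : pvLoopA (y :: ys) y false (decide (3 ≤ m)) = pvLoopA ys y true (decide (3 ≤ m)) := by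
          simp [pvLoopA]
        rw [step, hrec]
        congr 1
        rw [decide_eq_decide]
        simp only [List.length_cons]
        omega
    · have hne : (y == prev) = false := by simp [h]
      rw [List.takeWhile_cons_of_neg (by simp [h]), List.dropWhile_cons_of_neg (by simp [h])]
      have hrec := ih y 1 (by omega) hx' hy1
      rw [(by decide : decide ((1 : Nat) % 2 = 0) = false), (by decide : decide ((3 : Nat) ≤ 1) = false)] at hrec
      have hRL : pvHasRun2 (y :: ys)
          = (decide (1 + (ys.takeWhile (· == y)).length = 2) || pvHasRun2 (ys.dropWhile (· == y))) :=
        pv_hasRun2_cons y ys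
      rcases Nat.even_or_odd m with he | ho
      · have he' : m % 2 = 0 := Nat.even_iff.mp he
        have e1 : decide (m % 2 = 0) = true := by simp [he']
        by_cases h3 : 3 ≤ m
        · -- repeats ∧ adjacents (even run ≥ 4 ends): reset and continue
          have e3 : decide (3 ≤ m) = true := by simp [h3]
          rw [e1, e3]
          have step : pvLoopA (y :: ys) prev true true = pvLoopA ys y false false := by
            simp [pvLoopA, h, hp]
          rw [step, hrec]
          have hz : decide (m + List.length ([] : List Int) = 2) = false := by simp; omega
          rw [hz, Bool.false_or, hRL]
        · -- repeats ∧ ¬adjacents (run of length exactly 2 ends): return True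
          have hm2 : m = 2 := by omega
          subst hm2
          simp [pvLoopA, h]
      · -- repeats = false (odd run ends): continue with new prev
        have ho' : m % 2 = 1 := Nat.odd_iff.mp ho
        have e1 : decide (m % 2 = 0) = false := by simp [ho']
        rw [e1]
        have step : pvLoopA (y :: ys) prev false (decide (3 ≤ m)) = pvLoopA ys y false false := by
          simp [pvLoopA, h, hp]
        rw [step, hrec]
        have hz : decide (m + List.length ([] : List Int) = 2) = false := by simp; omega
        rw [hz, Bool.false_or, hRL]

theorem pv_main (ds : List Int) (h1 : (-1 : Int) ∉ ds) (h2 : (-2 : Int) ∉ ds) :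
    repeat_criteria ds = repeat_criteria_alt ds := by
  rw [pv_alt_eq_hasRun2]
  have hsym := pv_hasRun2_reverse ds.reverse.length ds.reverse rfl
  rw [List.reverse_reverse] at hsym
  rw [hsym, repeat_criteria]
  cases hrev : ds.reverse with
  | nil => simp [pvLoopA, pvHasRun2]
  | cons y ys =>
    have hymem : y ∈ ds := by
      have : y ∈ ds.reverse := by rw [hrev]; exact List.mem_cons_self
      simpa using this
    have hy2 : y ≠ -2 := fun he => h2 (he ▸ hymem)
    have hy1 : y ≠ -1 := fun he => h1 (he ▸ hymem)
    have hx' : (-1 : Int) ∉ ys := by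
      intro hmem
      have : (-1 : Int) ∈ ds.reverse := by rw [hrev]; exact List.mem_cons_of_mem _ hmem
      exact h1 (by simpa using this)
    have step : pvLoopA (y :: ys) (-2) false true = pvLoopA ys y false false := by
      simp [pvLoopA, hy2]
    rw [step]
    have := pv_loopA_char ys y 1 (by omega) hx' hy1
    rw [(by decide : decide ((1 : Nat) % 2 = 0) = false),
      (by decide : decide ((3 : Nat) ≤ 1) = false)] at this
    rw [this, pv_hasRun2_cons]


-- ===== VERDICT (by name: the statement is the Claim_ definition above) =====
theorem repeat_criteria_spec : Claim_equal_repeat_criteria := by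
  intro ds _ hpre
  unfold Spec_repeat_criteria
  exact pv_main ds hpre.1 hpre.2
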